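-- pv_equiv track=rewrite | github.com/JWaters02/fyp-photo-filter | backend/ai/filtering.py | collect_excluded_users
-- ===== SOURCE A (Python) =====
-- from collections import defaultdict
--
-- def collect_excluded_users(all_matches, rules):
--     # Group face cutouts by the original image path
--     original_to_cutouts = defaultdict(list)
--     for face, _ in all_matches.items():
--         ext = face.split('.')[-1]
--         # TODO: There might be an edge case here if the cutout image has _10 or more in the name
--         original_image_path = f'photos/{face.split("/")[1]}/uploaded/{face.split("/")[-2]}.{ext}'
--         original_to_cutouts[original_image_path].append(face)
--
--     # Collect excluded users for each original image
--     excluded_users_per_original = {original: set() for original in original_to_cutouts.keys()}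
--
--     for original, cutouts in original_to_cutouts.items():
--         for face in cutouts:
--             uploader_uid = face.split('/')[1]
--             uploader_rules = rules.get(uploader_uid, {})
--
--             # First add the uploader to the excluded users
--             excluded_users_per_original[original].add(uploader_uid)
--
--             # Add users excluded by uploader's 'hideAllPhotosUploadedByMeFrom' rule
--             excluded_by_uploader = uploader_rules.get('hideAllPhotosUploadedByMeFrom', {}).keys()
--             excluded_users_per_original[original].update(excluded_by_uploader)
--
--             # Add users excluded by subject's 'hideMyPhotosContainingMeFrom' rule
--             subject_uid = all_matches[face].split('/')[1]
--             subject_rules = rules.get(subject_uid, {})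
--             excluded_by_subject = subject_rules.get('hideMyPhotosContainingMeFrom', {}).keys()
--             excluded_users_per_original[original].update(excluded_by_subject)
--
--     return excluded_users_per_original
-- ===== SOURCE B (Python) =====
-- from collections import defaultdict
--
-- def collect_excluded_users(all_matches, rules):
--     # Single pass: route every face straight to its original image's exclusion set;
--     # no intermediate original_to_cutouts grouping is built or re-traversed.
--     excluded = defaultdict(set)
--     for face, match in all_matches.items():
--         ext = face.split('.')[-1]
--         original = f'photos/{face.split("/")[1]}/uploaded/{face.split("/")[-2]}.{ext}'
--         uploader_uid = face.split('/')[1]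
--         s = excluded[original]
--         s.add(uploader_uid)
--         s.update(rules.get(uploader_uid, {}).get('hideAllPhotosUploadedByMeFrom', {}).keys())
--         subject_uid = match.split('/')[1]
--         s.update(rules.get(subject_uid, {}).get('hideMyPhotosContainingMeFrom', {}).keys())
--     return dict(excluded)
-- ===== Notes on version B (the rewrite author's own statement) =====
-- stated objective: simpler
-- what changed: B replaces A's two phases (build an original_to_cutouts grouping dict, then iterate group by group re-splitting every face path) with one single pass over all_matches.items() that adds each face's uploader and rule-derived exclusions directly into a defaultdict(set) keyed by the original image path; no intermediate grouping structure is built or re-traversed.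
import Mathlib
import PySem

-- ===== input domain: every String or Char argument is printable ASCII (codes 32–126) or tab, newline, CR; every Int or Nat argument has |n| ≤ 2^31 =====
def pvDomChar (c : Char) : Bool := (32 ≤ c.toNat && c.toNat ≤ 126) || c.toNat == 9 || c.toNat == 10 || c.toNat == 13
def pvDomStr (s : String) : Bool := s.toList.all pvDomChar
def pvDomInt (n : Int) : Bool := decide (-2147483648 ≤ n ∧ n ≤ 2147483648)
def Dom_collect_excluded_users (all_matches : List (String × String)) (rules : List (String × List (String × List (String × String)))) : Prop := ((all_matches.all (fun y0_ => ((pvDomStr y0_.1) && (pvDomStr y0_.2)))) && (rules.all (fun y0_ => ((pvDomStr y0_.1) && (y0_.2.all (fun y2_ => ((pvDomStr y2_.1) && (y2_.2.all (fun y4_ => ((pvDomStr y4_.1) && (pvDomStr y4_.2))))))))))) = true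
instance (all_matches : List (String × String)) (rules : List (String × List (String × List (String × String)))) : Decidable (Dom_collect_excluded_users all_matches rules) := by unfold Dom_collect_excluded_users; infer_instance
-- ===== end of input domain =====

-- B replaces A's two phases (group faces by original image, then walk every group re-deriving
-- the same per-face data) by one single pass over all_matches that routes each face's exclusions
-- straight into its original's set; objective: simpler (no intermediate grouping dict).

-- shared pure helpers (both Pythons compute these identical sub-expressions)
-- face.split('/')[1]
def pvUp (face : String) : String := PySem.List.pyGetD ((PySem.Str.split? face "/").getD []) 1 ""
-- f'photos/{face.split("/")[1]}/uploaded/{face.split("/")[-2]}.{face.split(".")[-1]}'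
def pvOrig (face : String) : String :=
  "photos/" ++ pvUp face ++ "/uploaded/" ++ PySem.List.pyGetD ((PySem.Str.split? face "/").getD []) (-2) ""
    ++ "." ++ PySem.List.pyGetD ((PySem.Str.split? face ".").getD []) (-1) ""
-- rules.get(uid, {}).get(rule, {}).keys()
def pvRule (rules : List (String × List (String × List (String × String)))) (uid rule : String) : List String :=
  (PySem.Dict.ofList ((PySem.Dict.ofList ((PySem.Dict.ofList rules).getD uid [])).getD rule [])).keys

-- ===== PORT A =====
-- A's excluded_users_per_original[original].add/update mutate the set stored at a key that is
-- always present; ported as Dict.modify (exact when the key is present, as it is here).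
def collect_excluded_users (all_matches : List (String × String)) (rules : List (String × List (String × List (String × String)))) : List (String × List String) :=
  let am := PySem.Dict.ofList all_matches
  -- original_to_cutouts = defaultdict(list); append per face
  let otc : PySem.Dict String (List String) :=
    am.items.foldl (fun d p => d.modify (pvOrig p.1) [] (fun l => l ++ [p.1])) PySem.Dict.empty
  -- {original: set() for original in original_to_cutouts.keys()}
  let exc0 : PySem.Dict String (PySem.Set String) :=
    otc.keys.foldl (fun d o => d.insert o PySem.Set.empty) PySem.Dict.empty
  -- for original, cutouts in original_to_cutouts.items(): for face in cutouts: …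
  let exc : PySem.Dict String (PySem.Set String) :=
    otc.items.foldl (fun d oc =>
      oc.2.foldl (fun d face =>
        let d1 := d.modify oc.1 PySem.Set.empty (fun s => PySem.Set.add s (pvUp face))
        let d2 := d1.modify oc.1 PySem.Set.empty
          (fun s => PySem.Set.update s (pvRule rules (pvUp face) "hideAllPhotosUploadedByMeFrom"))
        d2.modify oc.1 PySem.Set.empty
          (fun s => PySem.Set.update s (pvRule rules (pvUp (am.getD face "")) "hideMyPhotosContainingMeFrom"))) d) exc0
  exc.items

-- ===== PORT B =====
def collect_excluded_users_alt (all_matches : List (String × String)) (rules : List (String × List (String × List (String × String)))) : List (String × List String) :=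
  -- excluded = defaultdict(set); one pass: s = excluded[original]; s.add(…); s.update(…); s.update(…)
  ((PySem.Dict.ofList all_matches).items.foldl (fun d p =>
      d.modify (pvOrig p.1) PySem.Set.empty (fun s =>
        PySem.Set.update
          (PySem.Set.update (PySem.Set.add s (pvUp p.1))
            (pvRule rules (pvUp p.1) "hideAllPhotosUploadedByMeFrom"))
          (pvRule rules (pvUp p.2) "hideMyPhotosContainingMeFrom")))
    PySem.Dict.empty).items

-- ===== PRECONDITION & SPEC =====
-- Pre_ excludes exactly the inputs on which the Python raises IndexError: a face key or its
-- matched value (in the dict built from all_matches) with no '/' makes split('/')[1] fail.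
def Pre_collect_excluded_users (all_matches : List (String × String)) (rules : List (String × List (String × List (String × String)))) : Prop :=
  ∀ p ∈ (PySem.Dict.ofList all_matches).items,
    2 ≤ ((PySem.Str.split? p.1 "/").getD []).length ∧ 2 ≤ ((PySem.Str.split? p.2 "/").getD []).length
instance (all_matches : List (String × String)) (rules : List (String × List (String × List (String × String)))) : Decidable (Pre_collect_excluded_users all_matches rules) := by unfold Pre_collect_excluded_users; infer_instance

def pvWitness_collect_excluded_users : (List (String × String)) × (List (String × List (String × List (String × String)))) :=
  ([("photos/u1/cutouts/img1/face_0.jpg", "users/u2/ref.jpg")],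
   [("u1", [("hideAllPhotosUploadedByMeFrom", [("u3", "1")])])])

def Spec_collect_excluded_users (all_matches : List (String × String)) (rules : List (String × List (String × List (String × String)))) (out : List (String × List String)) : Prop := out = collect_excluded_users_alt all_matches rules
instance (all_matches : List (String × String)) (rules : List (String × List (String × List (String × String)))) (out : List (String × List String)) : Decidable (Spec_collect_excluded_users all_matches rules out) := by unfold Spec_collect_excluded_users; infer_instance

-- ===== CLAIM (what is proved, stated in full; the proofs are below) =====
def Claim_equal_collect_excluded_users : Prop := ∀ (all_matches : List (String × String)) (rules : List (String × List (String × List (String × String)))), Dom_collect_excluded_users all_matches rules → Pre_collect_excluded_users all_matches rules → Spec_collect_excluded_users all_matches rules (collect_excluded_users all_matches rules)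

-- ===== LEMMAS AND PROOFS =====

-- the per-face update both programs apply to the set of a face's original image
def pvUpd (rules : List (String × List (String × List (String × String)))) (face mt : String) (s : PySem.Set String) : PySem.Set String :=
  PySem.Set.update
    (PySem.Set.update (PySem.Set.add s (pvUp face)) (pvRule rules (pvUp face) "hideAllPhotosUploadedByMeFrom"))
    (pvRule rules (pvUp mt) "hideMyPhotosContainingMeFrom")

-- getD through a fold whose every step changes only the entry of the key it touches
theorem pv_foldl_getD_local {β ν : Type} (P : β → Bool) (F : β → ν → ν) (c : String) (v0 : ν) :
    ∀ (l : List β) (step : PySem.Dict String ν → β → PySem.Dict String ν),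
      (∀ d x, x ∈ l → (step d x).getD c v0 = if P x then F x (d.getD c v0) else d.getD c v0) →
      ∀ d, (l.foldl step d).getD c v0 = (l.filter P).foldl (fun s x => F x s) (d.getD c v0) := by
  intro l
  induction l with
  | nil => intro step h d; rfl
  | cons x xs ih =>
    intro step h d
    have hx := h d x List.mem_cons_self
    have hrec := ih step (fun d y hy => h d y (List.mem_cons_of_mem _ hy)) (step d x)
    rw [List.foldl_cons, hrec, hx, List.filter_cons]
    cases hP : P x <;> simp [hP]

-- keys through a fold whose every step preserves a fixed key list
theorem pv_foldl_keys_inv {β ν : Type} (K : List String) :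
    ∀ (l : List β) (step : PySem.Dict String ν → β → PySem.Dict String ν),
      (∀ d x, x ∈ l → d.keys = K → (step d x).keys = K) →
      ∀ d, d.keys = K → (l.foldl step d).keys = K := by
  intro l
  induction l with
  | nil => intro step h d hd; exact hd
  | cons x xs ih =>
    intro step h d hd
    exact ih step (fun d y hy => h d y (List.mem_cons_of_mem _ hy)) (step d x)
      (h d x List.mem_cons_self hd)

theorem pv_keys_modify_of_mem {ν : Type} (d : PySem.Dict String ν) (k : String) (d0 : ν) (f : ν → ν)
    (h : k ∈ d.keys) : (d.modify k d0 f).keys = d.keys := by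
  rw [PySem.Dict.keys_modify, PySem.Dict.keys_insert_of_contains]
  exact (PySem.Dict.contains_iff_mem_keys d k).2 h

theorem pv_keys_modify3 {ν : Type} (d : PySem.Dict String ν) (k : String) (d0 : ν)
    (f g h : ν → ν) (hk : k ∈ d.keys) :
    (((d.modify k d0 f).modify k d0 g).modify k d0 h).keys = d.keys := by
  have e1 := pv_keys_modify_of_mem d k d0 f hk
  have h2 : k ∈ (d.modify k d0 f).keys := by rw [e1]; exact hk
  have e2 := pv_keys_modify_of_mem _ k d0 g h2
  have h3 : k ∈ ((d.modify k d0 f).modify k d0 g).keys := by rw [e2]; exact h2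
  rw [pv_keys_modify_of_mem _ k d0 h h3, e2, e1]

theorem pv_foldl_const_nil {β : Type} : ∀ (l : List β),
    l.foldl (fun (_ : PySem.Set String) (_ : β) => ([] : PySem.Set String)) [] = [] := by
  intro l; induction l with
  | nil => rfl
  | cons x xs ih => simpa using ih

theorem pv_filter_eq_self_of_nodup_mem {c : String} : ∀ (l : List String), l.Nodup → c ∈ l →
    l.filter (fun k => k == c) = [c] := by
  intro l hnd hc
  rw [List.filter_beq, List.count_eq_one_of_mem hnd hc, List.replicate_one]

-- both results are dicts keyed by the distinct originals in face order, with equal entries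
theorem pv_main (all_matches : List (String × String)) (rules : List (String × List (String × List (String × String)))) :
    collect_excluded_users all_matches rules = collect_excluded_users_alt all_matches rules := by
  unfold collect_excluded_users collect_excluded_users_alt
  simp only [PySem.Set.empty]
  set am := PySem.Dict.ofList all_matches with ham
  set KL : List String := PySem.Set.ofList (am.items.map (fun p => pvOrig p.1)) with hKL
  have hKLnd : KL.Nodup := PySem.Set.nodup_ofList _
  -- keys of the grouping dict
  have hotc_keys : (am.items.foldl (fun d p => d.modify (pvOrig p.1) [] (fun l => l ++ [p.1]))
      (PySem.Dict.empty : PySem.Dict String (List String))).keys = KL := by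
    rw [PySem.Dict.keys_foldl_modify_key am.items (fun p => pvOrig p.1) [] (fun _ p l => l ++ [p.1])]
    simp [PySem.Set.update_nil_left, hKL]
  set otc := am.items.foldl (fun d p => d.modify (pvOrig p.1) [] (fun l => l ++ [p.1]))
      (PySem.Dict.empty : PySem.Dict String (List String)) with hotc
  have hotcnd : otc.keys.Nodup := by rw [hotc_keys]; exact hKLnd
  -- the grouping dict's entry at c
  have hotc_getD : ∀ c, otc.getD c [] =
      (am.items.filter (fun p => pvOrig p.1 == c)).map Prod.fst := by
    intro c
    rw [hotc, pv_foldl_getD_local (fun p => pvOrig p.1 == c) (fun p l => l ++ [p.1]) c []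
        am.items _ (by
          intro d p _
          rw [PySem.Dict.getD_modify]
          by_cases h : c = pvOrig p.1
          · simp [h]
          · simp [h, Ne.symm h])]
    simp only [PySem.Dict.getD_empty]
    simpa using PySem.List.foldl_append_singleton_eq_map Prod.fst
      (am.items.filter (fun p => pvOrig p.1 == c)) []
  -- the seed dict {original: set()} : keys are KL, every entry is the empty set
  set exc0 := otc.keys.foldl (fun d o => d.insert o ([] : PySem.Set String))
      (PySem.Dict.empty : PySem.Dict String (PySem.Set String)) with hexc0
  have hexc0_keys : exc0.keys = KL := by
    rw [hexc0, PySem.Dict.keys_foldl_insert otc.keys (fun _ _ => ([] : PySem.Set String))]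
    simp only [PySem.Dict.keys_empty, PySem.Set.update_nil_left]
    rw [PySem.Set.ofList_eq_self_of_nodup _ hotcnd, hotc_keys]
  have hexc0_getD : ∀ c, exc0.getD c [] = [] := by
    intro c
    rw [hexc0, pv_foldl_getD_local (fun o => o == c) (fun _ _ => ([] : PySem.Set String)) c []
        otc.keys _ (by
          intro d o _
          rw [PySem.Dict.getD_insert]
          by_cases h : c = o
          · simp [h]
          · simp [h, Ne.symm h])]
    simp only [PySem.Dict.getD_empty]
    exact pv_foldl_const_nil _
  -- A's phase-2 fold: keys stay KL, the entry at c collects its group's per-face updates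
  set stepA := fun (d : PySem.Dict String (PySem.Set String)) (oc : String × List String) =>
      oc.2.foldl (fun d face =>
        let d1 := d.modify oc.1 [] (fun s => PySem.Set.add s (pvUp face))
        let d2 := d1.modify oc.1 []
          (fun s => PySem.Set.update s (pvRule rules (pvUp face) "hideAllPhotosUploadedByMeFrom"))
        d2.modify oc.1 []
          (fun s => PySem.Set.update s (pvRule rules (pvUp (am.getD face "")) "hideMyPhotosContainingMeFrom"))) d
    with hstepA
  have hstepA_getD : ∀ (oc : String × List String) (d : PySem.Dict String (PySem.Set String)) (c : String),
      (stepA d oc).getD c [] = if oc.1 == c then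
        oc.2.foldl (fun s face => pvUpd rules face (am.getD face "") s) (d.getD c []) else d.getD c [] := by
    intro oc d c
    rw [hstepA]
    simp only []
    rw [pv_foldl_getD_local (fun _ => oc.1 == c) (fun face s => pvUpd rules face (am.getD face "") s) c []
        oc.2 _ (by
          intro d face _
          simp only [PySem.Dict.getD_modify]
          by_cases h : c = oc.1
          · simp [h, pvUpd]
          · simp [h, Ne.symm h])]
    by_cases h : (oc.1 == c) = true
    · simp [h]
    · simp only [Bool.not_eq_true] at h
      simp [h]
  have hA_keys : (otc.items.foldl stepA exc0).keys = KL := by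
    apply pv_foldl_keys_inv KL otc.items stepA _ exc0 hexc0_keys
    intro d oc hoc hd
    rw [hstepA]
    have hocK : oc.1 ∈ KL := hotc_keys ▸ PySem.Dict.mem_keys_of_mem_items otc hoc
    apply pv_foldl_keys_inv KL oc.2 _ _ d hd
    intro d face _ hd
    have h1 : oc.1 ∈ d.keys := by rw [hd]; exact hocK
    simp only []
    rw [pv_keys_modify3 _ _ _ _ _ _ h1]
    exact hd
  -- B's fold: keys are KL, the entry at c collects the same faces' updates in one pass
  set stepB := fun (d : PySem.Dict String (PySem.Set String)) (p : String × String) =>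
      d.modify (pvOrig p.1) [] (fun s =>
        PySem.Set.update
          (PySem.Set.update (PySem.Set.add s (pvUp p.1))
            (pvRule rules (pvUp p.1) "hideAllPhotosUploadedByMeFrom"))
          (pvRule rules (pvUp p.2) "hideMyPhotosContainingMeFrom")) with hstepB
  have hB_keys : (am.items.foldl stepB PySem.Dict.empty).keys = KL := by
    rw [hstepB]
    rw [PySem.Dict.keys_foldl_modify_key am.items (fun p => pvOrig p.1) []
        (fun _ p s => PySem.Set.update (PySem.Set.update (PySem.Set.add s (pvUp p.1))
          (pvRule rules (pvUp p.1) "hideAllPhotosUploadedByMeFrom"))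
          (pvRule rules (pvUp p.2) "hideMyPhotosContainingMeFrom"))]
    simp [PySem.Set.update_nil_left, hKL]
  have hB_getD : ∀ c, (am.items.foldl stepB PySem.Dict.empty).getD c [] =
      (am.items.filter (fun p => pvOrig p.1 == c)).foldl (fun s p => pvUpd rules p.1 p.2 s) [] := by
    intro c
    rw [hstepB, pv_foldl_getD_local (fun p => pvOrig p.1 == c) (fun p s => pvUpd rules p.1 p.2 s) c []
        am.items _ (by
          intro d p _
          simp only [PySem.Dict.getD_modify]
          by_cases h : c = pvOrig p.1
          · simp [h, pvUpd]
          · simp [h, Ne.symm h])]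
    simp only [PySem.Dict.getD_empty]
  -- A's entry at c ∈ KL equals B's
  have hamnd : am.keys.Nodup := PySem.Dict.nodup_keys_ofList all_matches
  have hA_getD : ∀ c ∈ KL, (otc.items.foldl stepA exc0).getD c [] =
      (am.items.filter (fun p => pvOrig p.1 == c)).foldl (fun s p => pvUpd rules p.1 p.2 s) [] := by
    intro c hc
    rw [pv_foldl_getD_local (fun oc => oc.1 == c)
        (fun oc s => oc.2.foldl (fun s face => pvUpd rules face (am.getD face "") s) s) c []
        otc.items stepA (fun d oc _ => hstepA_getD oc d c) exc0]
    rw [hexc0_getD]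
    have hitems : otc.items = KL.map (fun k => (k, otc.getD k [])) := by
      rw [PySem.Dict.items_eq_map_keys otc hotcnd [], hotc_keys]
    rw [hitems, List.filter_map]
    have hcomp : ((fun (oc : String × List String) => oc.1 == c) ∘ (fun k => (k, otc.getD k []))) =
        fun k => k == c := rfl
    rw [hcomp, pv_filter_eq_self_of_nodup_mem KL hKLnd hc]
    simp only [List.map_cons, List.map_nil, List.foldl_cons, List.foldl_nil]
    rw [hotc_getD c, List.foldl_map]
    apply PySem.List.foldl_congr_mem
    intro acc p hp
    have hpmem : p ∈ am.items := List.mem_of_mem_filter hp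
    have hget : am.getD p.1 "" = p.2 :=
      PySem.Dict.getD_of_mem_items am (by simpa using hpmem) hamnd ""
    rw [hget]
  -- assemble: same keys, same entries ⇒ same items
  have hAnd : (otc.items.foldl stepA exc0).keys.Nodup := by rw [hA_keys]; exact hKLnd
  have hBnd : (am.items.foldl stepB PySem.Dict.empty).keys.Nodup := by rw [hB_keys]; exact hKLnd
  rw [PySem.Dict.items_eq_map_keys (otc.items.foldl stepA exc0) hAnd [],
      PySem.Dict.items_eq_map_keys (am.items.foldl stepB PySem.Dict.empty) hBnd [], hA_keys, hB_keys]
  apply List.map_congr_left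
  intro k hk
  rw [hA_getD k hk, hB_getD k]

-- ===== VERDICT (by name: the statement is the Claim_ definition above) =====
theorem collect_excluded_users_spec : Claim_equal_collect_excluded_users := by
  intro all_matches rules _ _
  unfold Spec_collect_excluded_users
  exact pv_main all_matches rules
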